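-- pv_equiv track=rewrite | github.com/imasharc/aegis_project | backend/agent/summarization/summarization_formatter.py | _identify_sophistication_highlights
-- ===== SOURCE A (Python) =====
-- from typing import Dict, List, Any, Optional
--
-- def _identify_sophistication_highlights(unified_citations: List[Dict[str, Any]],
--                                       precision_analysis: Dict[str, Any]) -> List[str]:
--     """
--     Identify specific aspects of sophistication that should be highlighted to users.
--
--     This method looks for concrete evidence of the advanced processing that
--     users should understand they're receiving compared to basic systems.
--     """
--     highlights = []
--
--     # Check for enhanced citation precision
--     enhanced_citations = sum(1 for cite in unified_citations
--                            if cite.get('precision_level') in ['maximum', 'high'])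
--
--     if enhanced_citations > 0:
--         highlights.append(f"Enhanced structural analysis on {enhanced_citations} citations")
--
--     # Check for multi-domain integration
--     domains = set(cite.get('source_type', 'Unknown') for cite in unified_citations)
--     if len(domains) > 1:
--         highlights.append(f"Integrated guidance from {len(domains)} specialized domains")
--
--     # Check for procedural implementation detail
--     procedural_detail = sum(1 for cite in unified_citations
--                           if cite.get('domain') == 'procedural' and
--                              cite.get('precision_level') in ['maximum', 'high'])
--
--     if procedural_detail > 0:
--         highlights.append(f"Implementation-level detail on {procedural_detail} security procedures")
--
--     # Check for legal precision indicators
--     legal_precision = sum(1 for cite in unified_citations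
--                         if cite.get('domain') == 'legal' and
--                            cite.get('precision_level') in ['maximum', 'high'])
--
--     if legal_precision > 0:
--         highlights.append(f"Paragraph-level legal precision on {legal_precision} provisions")
--
--     # Check integration quality
--     integration_analysis = precision_analysis.get('integration_analysis', {})
--     integration_score = integration_analysis.get('integration_score', 0)
--
--     if integration_score >= 85:
--         highlights.append("Seamless cross-domain integration with precision preservation")
--
--     # Check for comprehensive coverage
--     total_citations = len(unified_citations)
--     if total_citations >= 6:
--         highlights.append(f"Comprehensive analysis across {total_citations} authoritative sources")
--
--     return highlights
-- ===== SOURCE B (Python) =====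
-- def _identify_sophistication_highlights(unified_citations, precision_analysis):
--     # Single pass over the citations maintaining four accumulators.
--     enhanced = procedural = legal = 0
--     domains = set()
--     for cite in unified_citations:
--         if cite.get('precision_level') in ('maximum', 'high'):
--             enhanced += 1
--             d = cite.get('domain')
--             if d == 'procedural':
--                 procedural += 1
--             elif d == 'legal':
--                 legal += 1
--         domains.add(cite.get('source_type', 'Unknown'))
--
--     highlights = []
--     if enhanced:
--         highlights.append(f"Enhanced structural analysis on {enhanced} citations")
--     if len(domains) > 1:
--         highlights.append(f"Integrated guidance from {len(domains)} specialized domains")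
--     if procedural:
--         highlights.append(f"Implementation-level detail on {procedural} security procedures")
--     if legal:
--         highlights.append(f"Paragraph-level legal precision on {legal} provisions")
--     if precision_analysis.get('integration_analysis', {}).get('integration_score', 0) >= 85:
--         highlights.append("Seamless cross-domain integration with precision preservation")
--     if len(unified_citations) >= 6:
--         highlights.append(f"Comprehensive analysis across {len(unified_citations)} authoritative sources")
--     return highlights
-- ===== Notes on version B (the rewrite author's own statement) =====
-- stated objective: simpler
-- what changed: Replaces A's four independent passes over unified_citations (three counting comprehensions plus a set comprehension) by one loop that maintains the three counters and the domain set together, then emits the highlights in A's order.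
import Mathlib
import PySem

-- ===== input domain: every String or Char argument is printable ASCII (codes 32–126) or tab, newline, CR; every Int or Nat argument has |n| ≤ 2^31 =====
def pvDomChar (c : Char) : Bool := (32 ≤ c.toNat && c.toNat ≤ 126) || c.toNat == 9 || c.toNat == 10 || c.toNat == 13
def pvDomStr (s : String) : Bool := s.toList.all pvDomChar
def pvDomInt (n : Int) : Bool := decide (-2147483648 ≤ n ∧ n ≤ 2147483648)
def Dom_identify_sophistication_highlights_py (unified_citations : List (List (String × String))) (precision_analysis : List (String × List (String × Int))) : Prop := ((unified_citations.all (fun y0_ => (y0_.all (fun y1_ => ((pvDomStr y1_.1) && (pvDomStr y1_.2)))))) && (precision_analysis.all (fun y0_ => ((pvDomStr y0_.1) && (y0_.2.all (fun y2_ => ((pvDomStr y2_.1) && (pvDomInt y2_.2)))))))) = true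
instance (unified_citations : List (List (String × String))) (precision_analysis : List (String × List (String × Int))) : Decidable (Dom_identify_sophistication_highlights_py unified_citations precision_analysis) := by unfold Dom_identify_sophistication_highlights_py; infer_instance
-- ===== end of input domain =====

-- B replaces A's four independent passes over unified_citations by ONE loop maintaining
-- three counters and the domain set (objective: alternative/simpler single-pass decomposition).

-- ===== PORT A =====
-- A's code, pass for pass: each 'sum(1 for … if …)' is its own fold, the set its own pass.
def identify_sophistication_highlights_py (unified_citations : List (List (String × String))) (precision_analysis : List (String × List (String × Int))) : List String :=
  let highlights : List String := []
  let enhanced_citations : Int := unified_citations.foldl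
    (fun n cite => if [some "maximum", some "high"].contains (cite.lookup "precision_level") then n + 1 else n) 0
  let highlights := if enhanced_citations > 0 then
    highlights ++ ["Enhanced structural analysis on " ++ PySem.Int.toStr enhanced_citations ++ " citations"] else highlights
  let domains : PySem.Set String := PySem.Set.ofList (unified_citations.map (fun cite => (cite.lookup "source_type").getD "Unknown"))
  let highlights := if PySem.Set.len domains > 1 then
    highlights ++ ["Integrated guidance from " ++ PySem.Int.toStr (PySem.Set.len domains) ++ " specialized domains"] else highlights
  let procedural_detail : Int := unified_citations.foldl
    (fun n cite => if cite.lookup "domain" == some "procedural" && [some "maximum", some "high"].contains (cite.lookup "precision_level") then n + 1 else n) 0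
  let highlights := if procedural_detail > 0 then
    highlights ++ ["Implementation-level detail on " ++ PySem.Int.toStr procedural_detail ++ " security procedures"] else highlights
  let legal_precision : Int := unified_citations.foldl
    (fun n cite => if cite.lookup "domain" == some "legal" && [some "maximum", some "high"].contains (cite.lookup "precision_level") then n + 1 else n) 0
  let highlights := if legal_precision > 0 then
    highlights ++ ["Paragraph-level legal precision on " ++ PySem.Int.toStr legal_precision ++ " provisions"] else highlights
  let integration_analysis := (precision_analysis.lookup "integration_analysis").getD []
  let integration_score : Int := (integration_analysis.lookup "integration_score").getD 0
  let highlights := if integration_score ≥ 85 then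
    highlights ++ ["Seamless cross-domain integration with precision preservation"] else highlights
  let total_citations : Int := PySem.List.len unified_citations
  let highlights := if total_citations ≥ 6 then
    highlights ++ ["Comprehensive analysis across " ++ PySem.Int.toStr total_citations ++ " authoritative sources"] else highlights
  highlights

-- ===== PORT B =====
-- one loop body: bump the counters that apply and add the source type to the set
def pvAltStep (st : Int × Int × Int × PySem.Set String) (cite : List (String × String)) : Int × Int × Int × PySem.Set String :=
  let (enhanced, procedural, legal, domains) := st
  let domains := PySem.Set.add domains ((cite.lookup "source_type").getD "Unknown")
  if cite.lookup "precision_level" == some "maximum" || cite.lookup "precision_level" == some "high" then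
    let d := cite.lookup "domain"
    (enhanced + 1,
     (if d == some "procedural" then procedural + 1 else procedural),
     (if d == some "procedural" then legal else if d == some "legal" then legal + 1 else legal),
     domains)
  else (enhanced, procedural, legal, domains)

def identify_sophistication_highlights_py_alt (unified_citations : List (List (String × String))) (precision_analysis : List (String × List (String × Int))) : List String :=
  let (enhanced, procedural, legal, domains) :=
    unified_citations.foldl pvAltStep (0, 0, 0, PySem.Set.empty)
  (if enhanced > 0 then ["Enhanced structural analysis on " ++ PySem.Int.toStr enhanced ++ " citations"] else []) ++
  (if PySem.Set.len domains > 1 then ["Integrated guidance from " ++ PySem.Int.toStr (PySem.Set.len domains) ++ " specialized domains"] else []) ++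
  (if procedural > 0 then ["Implementation-level detail on " ++ PySem.Int.toStr procedural ++ " security procedures"] else []) ++
  (if legal > 0 then ["Paragraph-level legal precision on " ++ PySem.Int.toStr legal ++ " provisions"] else []) ++
  (if (((precision_analysis.lookup "integration_analysis").getD []).lookup "integration_score").getD 0 ≥ 85 then
    ["Seamless cross-domain integration with precision preservation"] else []) ++
  (if PySem.List.len unified_citations ≥ 6 then
    ["Comprehensive analysis across " ++ PySem.Int.toStr (PySem.List.len unified_citations) ++ " authoritative sources"] else [])

-- ===== PRECONDITION & SPEC =====
def Spec_identify_sophistication_highlights_py (unified_citations : List (List (String × String))) (precision_analysis : List (String × List (String × Int))) (out : List String) : Prop := out = identify_sophistication_highlights_py_alt unified_citations precision_analysis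
instance (unified_citations : List (List (String × String))) (precision_analysis : List (String × List (String × Int))) (out : List String) : Decidable (Spec_identify_sophistication_highlights_py unified_citations precision_analysis out) := by unfold Spec_identify_sophistication_highlights_py; infer_instance

-- ===== CLAIM (what is proved, stated in full; the proofs are below) =====
def Claim_equal_identify_sophistication_highlights_py : Prop := ∀ (unified_citations : List (List (String × String))) (precision_analysis : List (String × List (String × Int))), Dom_identify_sophistication_highlights_py unified_citations precision_analysis → Spec_identify_sophistication_highlights_py unified_citations precision_analysis (identify_sophistication_highlights_py unified_citations precision_analysis)

-- ===== LEMMAS AND PROOFS =====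

-- B's combined fold equals the tuple of A's four independent passes
theorem pvFold_eq (uc : List (List (String × String))) :
    ∀ (e p l : Int) (d : PySem.Set String),
    uc.foldl pvAltStep (e, p, l, d) =
      (uc.foldl (fun n cite => if [some "maximum", some "high"].contains (cite.lookup "precision_level") then n + 1 else n) e,
       uc.foldl (fun n cite => if cite.lookup "domain" == some "procedural" && [some "maximum", some "high"].contains (cite.lookup "precision_level") then n + 1 else n) p,
       uc.foldl (fun n cite => if cite.lookup "domain" == some "legal" && [some "maximum", some "high"].contains (cite.lookup "precision_level") then n + 1 else n) l,
       uc.foldl (fun s cite => PySem.Set.add s ((cite.lookup "source_type").getD "Unknown")) d) := by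
  induction uc with
  | nil => intro e p l d; rfl
  | cons c tl ih =>
    intro e p l d
    simp only [List.foldl_cons]
    rw [show pvAltStep (e, p, l, d) c =
      ((if [some "maximum", some "high"].contains (c.lookup "precision_level") then e + 1 else e),
       (if c.lookup "domain" == some "procedural" && [some "maximum", some "high"].contains (c.lookup "precision_level") then p + 1 else p),
       (if c.lookup "domain" == some "legal" && [some "maximum", some "high"].contains (c.lookup "precision_level") then l + 1 else l),
       PySem.Set.add d ((c.lookup "source_type").getD "Unknown")) from by
        simp only [pvAltStep]
        split_ifs with h <;> simp_all]
    exact ih _ _ _ _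

theorem ite_append_singleton {c : Prop} [Decidable c] (hs : List String) (x : String) :
    (if c then hs ++ [x] else hs) = hs ++ (if c then [x] else []) := by
  split_ifs <;> simp

-- ===== VERDICT (by name: the statement is the Claim_ definition above) =====
theorem identify_sophistication_highlights_py_spec : Claim_equal_identify_sophistication_highlights_py := by
  intro uc pa _
  show identify_sophistication_highlights_py uc pa = identify_sophistication_highlights_py_alt uc pa
  unfold identify_sophistication_highlights_py identify_sophistication_highlights_py_alt
  rw [pvFold_eq uc 0 0 0 PySem.Set.empty]
  simp only [PySem.Set.ofList_eq_foldl, List.foldl_map]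
  rw [ite_append_singleton, ite_append_singleton, ite_append_singleton, ite_append_singleton,
    ite_append_singleton, ite_append_singleton]
  simp only [PySem.Set.empty, List.nil_append, List.append_assoc]
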